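-- pv_equiv track=rewrite | github.com/konszymanski/leetcode-dataset | obfuscated_solutions/python/0693-binary-number-with-alternating-bits/solution_2_l0_l3.py | hasAlternatingBits
-- ===== SOURCE A (Python) =====
-- def hasAlternatingBits(n):
--     if 1 + 1 == 2:
--         (n, cur) = divmod(n, 2)
--     while n:
--         if cur == n % 2:
--             return False
--         (n, cur) = divmod(n, 2)
--     return True
-- ===== SOURCE B (Python) =====
-- def hasAlternatingBits(n):
--     if n < 0:
--         return False
--     m = n ^ (n >> 1)
--     return m & (m + 1) == 0
-- ===== Notes on version B (the rewrite author's own statement) =====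
-- stated objective: idiomatic
-- what changed: Replaces the bit-by-bit divmod loop with the standard closed-form bit trick: m = n ^ (n >> 1) must be an all-ones mask, tested by m & (m+1) == 0 (negatives are never alternating, as in A).
import Mathlib
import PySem

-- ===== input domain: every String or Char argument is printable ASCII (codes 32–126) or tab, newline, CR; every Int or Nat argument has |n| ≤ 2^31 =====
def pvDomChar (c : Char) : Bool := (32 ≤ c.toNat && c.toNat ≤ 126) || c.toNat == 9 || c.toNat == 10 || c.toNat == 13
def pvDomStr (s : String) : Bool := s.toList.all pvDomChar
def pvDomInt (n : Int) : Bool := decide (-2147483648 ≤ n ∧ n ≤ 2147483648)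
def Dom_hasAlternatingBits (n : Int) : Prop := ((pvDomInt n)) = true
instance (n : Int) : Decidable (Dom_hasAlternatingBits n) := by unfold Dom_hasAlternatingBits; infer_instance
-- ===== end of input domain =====

-- B replaces A's bit-by-bit divmod loop with the closed-form bit trick m = n ^ (n >> 1), m & (m+1) == 0 (idiomatic; return values agree on all ints).

-- ===== PORT A =====
-- the 'while n:' loop of A, with a fuel argument that only makes the recursion
-- structural; pvLoopA passes fuel 2*|n|+2, proven sufficient below (the loop's
-- measure 2*|n| + parity-offset strictly decreases each iteration)
def pvLoopAFuel : Nat → Int → Int → Bool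
  | 0, _, _ => true
  | fuel + 1, n, cur =>
    if n = 0 then true
    else if cur = PySem.Int.mod n 2 then false
    else pvLoopAFuel fuel (PySem.Int.floordiv n 2) (PySem.Int.mod n 2)

def pvLoopA (n cur : Int) : Bool := pvLoopAFuel (2 * n.natAbs + 2) n cur

def hasAlternatingBits (n : Int) : Bool :=
  -- A's 'if 1 + 1 == 2:' guard is always true: the initial divmod always runs
  pvLoopA (PySem.Int.floordiv n 2) (PySem.Int.mod n 2)

-- ===== PORT B =====
def hasAlternatingBits_alt (n : Int) : Bool :=
  if n < 0 then false
  else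
    let m := PySem.Int.bxor n (n >>> 1)
    PySem.Int.band m (m + 1) == 0

-- ===== PRECONDITION & SPEC =====
def Spec_hasAlternatingBits (n : Int) (out : Bool) : Prop := out = hasAlternatingBits_alt n
instance (n : Int) (out : Bool) : Decidable (Spec_hasAlternatingBits n out) := by unfold Spec_hasAlternatingBits; infer_instance

-- ===== CLAIM (what is proved, stated in full; the proofs are below) =====
def Claim_equal_hasAlternatingBits : Prop := ∀ (n : Int), Dom_hasAlternatingBits n → Spec_hasAlternatingBits n (hasAlternatingBits n)

-- ===== LEMMAS AND PROOFS =====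

-- A's loop on a negative first argument always returns False (with sufficient fuel)
theorem pvLoopAFuel_neg (f : Nat) (n cur : Int) (hf : 2 * n.natAbs + 2 ≤ f) (hn : n < 0) :
    pvLoopAFuel f n cur = false := by
  induction f generalizing n cur with
  | zero => omega
  | succ f ih =>
    rw [pvLoopAFuel]
    rw [if_neg (by omega : ¬n = 0)]
    by_cases hc : cur = PySem.Int.mod n 2
    · rw [if_pos hc]
    · rw [if_neg hc]
      have hfd : PySem.Int.floordiv n 2 = n / 2 := PySem.Int.floordiv_eq_ediv_of_pos (by omega)
      have hmd : PySem.Int.mod n 2 = n % 2 := PySem.Int.mod_eq_emod_of_pos (by omega)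
      by_cases h1 : n = -1
      · -- n stays -1 but cur becomes 1 = (-1) % 2, so the next step returns False
        subst h1
        cases f with
        | zero => omega
        | succ g =>
          have e1 : (-1 : Int) / 2 = -1 := by decide
          have e2 : (-1 : Int) % 2 = 1 := by decide
          rw [hfd, hmd, e1, e2, pvLoopAFuel]
          rw [if_neg (by omega : ¬(-1 : Int) = 0)]
          rw [if_pos (by rw [PySem.Int.mod_eq_emod_of_pos (by omega : (0:Int) < 2)]; decide)]
      · apply ih
        · rw [hfd]; omega
        · rw [hfd]; omega

theorem pvLoopA_neg (n cur : Int) (hn : n < 0) : pvLoopA n cur = false :=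
  pvLoopAFuel_neg _ n cur (by omega) hn

-- Nat version of A's loop, used as a reference
def loopN (n cur : Nat) : Bool :=
  if n = 0 then true
  else if cur = n % 2 then false
  else loopN (n / 2) (n % 2)
termination_by n
decreasing_by omega

theorem pvLoopAFuel_natCast (f n cur : Nat) (hf : 2 * n + 2 ≤ f) :
    pvLoopAFuel f (n : Int) (cur : Int) = loopN n cur := by
  fun_induction loopN n cur generalizing f with
  | case1 cur =>
    cases f with
    | zero => omega
    | succ g =>
      rw [pvLoopAFuel]
      simp
  | case2 n h1 =>
    cases f with
    | zero => omega
    | succ g =>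
    have hmd : PySem.Int.mod (n : Int) 2 = ((n % 2 : Nat) : Int) := by
      exact_mod_cast PySem.Int.mod_natCast n 2
    have hne : (n : Int) ≠ 0 := by exact_mod_cast h1
    rw [pvLoopAFuel, hmd, if_neg hne, if_pos rfl]
  | case3 n cur h1 h2 ih =>
    cases f with
    | zero => omega
    | succ g =>
    have hmd : PySem.Int.mod (n : Int) 2 = ((n % 2 : Nat) : Int) := by
      exact_mod_cast PySem.Int.mod_natCast n 2
    have hfd : PySem.Int.floordiv (n : Int) 2 = ((n / 2 : Nat) : Int) := by
      exact_mod_cast PySem.Int.floordiv_natCast n 2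
    have hne : (n : Int) ≠ 0 := by exact_mod_cast h1
    have hne2 : (cur : Int) ≠ ((n % 2 : Nat) : Int) := by exact_mod_cast h2
    rw [pvLoopAFuel, hmd, hfd, if_neg hne, if_neg hne2]
    exact ih g (by omega)

theorem pvLoopA_natCast (n cur : Nat) : pvLoopA (n : Int) (cur : Int) = loopN n cur := by
  unfold pvLoopA
  apply pvLoopAFuel_natCast
  simp

-- bit-level helper lemmas on Nat

theorem xor_mod_two (a b : Nat) : (a ^^^ b) % 2 = (a % 2) ^^^ (b % 2) := by
  have h1 := Nat.testBit_xor a b 0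
  simp only [Nat.testBit_zero] at h1
  rcases Nat.mod_two_eq_zero_or_one a with ha | ha <;>
    rcases Nat.mod_two_eq_zero_or_one b with hb | hb <;>
    rcases Nat.mod_two_eq_zero_or_one (a ^^^ b) with hx | hx <;>
    rw [ha, hb, hx] at h1 ⊢ <;> first | decide | simp at h1

theorem and_mod_two (a b : Nat) : (a &&& b) % 2 = (a % 2) &&& (b % 2) := by
  have h1 := Nat.testBit_and a b 0
  simp only [Nat.testBit_zero] at h1
  rcases Nat.mod_two_eq_zero_or_one a with ha | ha <;>
    rcases Nat.mod_two_eq_zero_or_one b with hb | hb <;>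
    rcases Nat.mod_two_eq_zero_or_one (a &&& b) with hx | hx <;>
    rw [ha, hb, hx] at h1 ⊢ <;> first | decide | simp at h1

theorem xor_div_two (a b : Nat) : (a ^^^ b) / 2 = (a / 2) ^^^ (b / 2) := by
  apply Nat.eq_of_testBit_eq
  intro i
  have h1 : ((a ^^^ b) / 2).testBit i = (a ^^^ b).testBit (i + 1) := (Nat.testBit_succ _ _).symm
  rw [h1, Nat.testBit_xor, Nat.testBit_xor, Nat.testBit_succ, Nat.testBit_succ]

theorem and_div_two (a b : Nat) : (a &&& b) / 2 = (a / 2) &&& (b / 2) := by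
  apply Nat.eq_of_testBit_eq
  intro i
  have h1 : ((a &&& b) / 2).testBit i = (a &&& b).testBit (i + 1) := (Nat.testBit_succ _ _).symm
  rw [h1, Nat.testBit_and, Nat.testBit_and, Nat.testBit_succ, Nat.testBit_succ]

theorem and_succ_of_even (m : Nat) (he : m % 2 = 0) (hne : m ≠ 0) :
    m &&& (m + 1) ≠ 0 := by
  -- some bit of m is set; it is not bit 0, and m+1 keeps all bits ≥ 1 of m
  have hex : ∃ i, m.testBit i = true := by
    by_contra h
    refine hne (Nat.eq_of_testBit_eq fun i => ?_)
    rw [Nat.zero_testBit]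
    cases hti : m.testBit i
    · rfl
    · exact absurd ⟨i, hti⟩ h
  obtain ⟨i, hi⟩ := hex
  have hi0 : i ≠ 0 := by
    intro h0
    rw [h0, Nat.testBit_zero] at hi
    simp at hi
    omega
  obtain ⟨j, rfl⟩ := Nat.exists_eq_succ_of_ne_zero hi0
  intro hzero
  have := congrArg (fun x => Nat.testBit x (j + 1)) hzero
  simp only [Nat.testBit_and, Nat.zero_testBit] at this
  rw [Nat.testBit_succ, Nat.testBit_succ] at this
  have hdiv : (m + 1) / 2 = m / 2 := by omega
  rw [hdiv] at this
  rw [Nat.testBit_succ] at hi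
  simp [hi] at this

theorem and_succ_of_odd (m : Nat) (ho : m % 2 = 1) :
    m &&& (m + 1) = 2 * ((m / 2) &&& (m / 2 + 1)) := by
  have hx : (m &&& (m + 1)) % 2 = 0 := by
    have h2 : (m + 1) % 2 = 0 := by omega
    rw [and_mod_two, ho, h2]
    decide
  have h12 : (m + 1) / 2 = m / 2 + 1 := by omega
  have hdiv : (m &&& (m + 1)) / 2 = (m / 2) &&& (m / 2 + 1) := by
    rw [and_div_two, h12]
  omega

-- the bit trick agrees with A's loop on every natural number
theorem trick_eq_loopN (a : Nat) :
    (((a ^^^ a / 2) &&& ((a ^^^ a / 2) + 1) = 0) ↔ loopN (a / 2) (a % 2) = true) := by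
  induction a using Nat.strong_induction_on with
  | _ a ih =>
    match a, ih with
    | 0, _ => rw [loopN]; decide
    | 1, _ => rw [loopN]; decide
    | (k + 2), ih =>
      set a := k + 2 with ha
      have hq : a / 2 ≠ 0 := by omega
      have hqlt : a / 2 < a := by omega
      by_cases hpar : a % 2 = (a / 2) % 2
      · -- same parity: m is even and nonzero, both sides false
        have hm0 : (a ^^^ a / 2) % 2 = 0 := by
          rw [xor_mod_two, hpar]
          simp
        have hmne : a ^^^ a / 2 ≠ 0 := by
          intro h
          have : a = a / 2 := Nat.xor_eq_zero_iff.mp h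
          omega
        constructor
        · intro h
          exact absurd h (and_succ_of_even _ hm0 hmne)
        · intro h
          rw [loopN] at h
          simp [hq, hpar] at h
      · -- different parity: m is odd, peel one bit and use the IH at a / 2
        have hm1 : (a ^^^ a / 2) % 2 = 1 := by
          rw [xor_mod_two]
          rcases Nat.mod_two_eq_zero_or_one a with h1 | h1 <;>
            rcases Nat.mod_two_eq_zero_or_one (a / 2) with h2 | h2 <;>
            rw [h1, h2] <;> first | decide | (exfalso; omega)
        have hstep : loopN (a / 2) (a % 2) = loopN (a / 2 / 2) (a / 2 % 2) := by
          rw [loopN]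
          simp [hq, hpar]
        rw [hstep, ← ih (a / 2) hqlt, and_succ_of_odd _ hm1, xor_div_two]
        constructor
        · intro h; omega
        · intro h; omega

-- ===== VERDICT (by name: the statement is the Claim_ definition above) =====
theorem hasAlternatingBits_spec : Claim_equal_hasAlternatingBits := by
  intro n _
  unfold Spec_hasAlternatingBits hasAlternatingBits hasAlternatingBits_alt
  by_cases hneg : n < 0
  · rw [if_pos hneg]
    apply pvLoopA_neg
    rw [PySem.Int.floordiv_eq_ediv_of_pos (by omega)]
    omega
  · rw [if_neg hneg]
    obtain ⟨a, rfl⟩ := Int.eq_ofNat_of_zero_le (by omega : (0:Int) ≤ n)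
    show pvLoopA (PySem.Int.floordiv (a : Int) 2) (PySem.Int.mod (a : Int) 2)
      = (PySem.Int.band (PySem.Int.bxor (a : Int) ((a : Int) >>> 1))
          (PySem.Int.bxor (a : Int) ((a : Int) >>> 1) + 1) == 0)
    have hfd : PySem.Int.floordiv (a : Int) 2 = ((a / 2 : Nat) : Int) := by
      exact_mod_cast PySem.Int.floordiv_natCast a 2
    have hmd : PySem.Int.mod (a : Int) 2 = ((a % 2 : Nat) : Int) := by
      exact_mod_cast PySem.Int.mod_natCast a 2
    rw [hfd, hmd, pvLoopA_natCast]
    have hshift : ((a : Int) >>> 1) = ((a >>> 1 : Nat) : Int) := (Int.natCast_shiftRight a 1).symm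
    rw [hshift, PySem.Int.bxor_natCast]
    have hb : PySem.Int.band ((a ^^^ a >>> 1 : Nat) : Int) (((a ^^^ a >>> 1 : Nat) : Int) + (1 : Int))
        = (((a ^^^ a >>> 1) &&& ((a ^^^ a >>> 1) + 1) : Nat) : Int) := by
      exact_mod_cast PySem.Int.band_natCast (a ^^^ a >>> 1) ((a ^^^ a >>> 1) + 1)
    rw [hb]
    rw [Nat.shiftRight_one a]
    by_cases hz : (a ^^^ a / 2) &&& ((a ^^^ a / 2) + 1) = 0
    · rw [(trick_eq_loopN a).mp hz, hz]
      decide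
    · have hl : loopN (a / 2) (a % 2) = false := by
        cases h : loopN (a / 2) (a % 2)
        · rfl
        · exact absurd ((trick_eq_loopN a).mpr h) hz
      rw [hl]
      simp
      exact hz
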